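-- pv_equiv track=rewrite | github.com/tanaxer01/proyectoTic | operaciones.py | checkChoosing
-- ===== SOURCE A (Python) =====
-- def checkChoosing(elegidos, MaxTime):
--     elegidos = sorted(elegidos, key= lambda x: x[0]-x[1]) #modificar ?
--     div = 0
--
--     for i in range(len(elegidos)):
--         if(elegidos[i][0] - elegidos[i][1] <= MaxTime):
--             elegidos[i][1] = 0
--             div += 1
--         else:
--             elegidos[i][1] += MaxTime
--
--     return elegidos[:div],elegidos[div:]
-- ===== SOURCE B (Python) =====
-- def checkChoosing(elegidos, MaxTime):
--     # sort, binary-search the split point on the monotone key, then two plain passes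
--     elegidos = sorted(elegidos, key=lambda x: x[0] - x[1])
--     lo, hi = 0, len(elegidos)
--     while lo < hi:
--         mid = (lo + hi) // 2
--         if elegidos[mid][0] - elegidos[mid][1] <= MaxTime:
--             lo = mid + 1
--         else:
--             hi = mid
--     head, tail = elegidos[:lo], elegidos[lo:]
--     for x in head:
--         x[1] = 0
--     for x in tail:
--         x[1] += MaxTime
--     return head, tail
-- ===== Notes on version B (the rewrite author's own statement) =====
-- stated objective: alternative
-- what changed: A fuses partitioning into one scan that tests each row and counts; B sorts, binary-searches the split point on the monotone key, then rewrites the two halves in two separate plain passes.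
import Mathlib
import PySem

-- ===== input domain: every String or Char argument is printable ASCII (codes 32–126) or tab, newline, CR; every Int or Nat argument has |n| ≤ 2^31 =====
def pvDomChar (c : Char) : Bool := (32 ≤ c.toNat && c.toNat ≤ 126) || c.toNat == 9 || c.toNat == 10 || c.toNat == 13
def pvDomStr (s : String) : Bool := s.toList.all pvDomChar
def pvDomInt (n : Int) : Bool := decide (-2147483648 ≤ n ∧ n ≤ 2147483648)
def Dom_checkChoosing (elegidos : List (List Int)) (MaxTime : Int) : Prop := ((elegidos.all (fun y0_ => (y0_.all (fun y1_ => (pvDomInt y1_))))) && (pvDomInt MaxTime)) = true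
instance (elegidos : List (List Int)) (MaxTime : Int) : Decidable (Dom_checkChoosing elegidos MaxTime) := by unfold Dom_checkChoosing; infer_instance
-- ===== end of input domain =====

-- B replaces A's fused scan-and-count with sort → binary-search of the split point → two
-- separate passes (objective: alternative). Equivalence is about the RETURN value; both
-- Pythons mutate the inner lists identically.

-- key x = x[0] - x[1], the sort key both Pythons use (total via getD; Pre_ keeps lists long enough)
def pvKey (x : List Int) : Int := (PySem.List.pyGet? x 0).getD 0 - (PySem.List.pyGet? x 1).getD 0

-- ===== PORT A =====
-- A's for-loop over the sorted list: rewrite slot 1 of each row, counting the rows with key ≤ MaxTime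
def chkLoopA (M : Int) : List (List Int) → List (List Int) × Int
  | [] => ([], 0)
  | x :: xs =>
    let r := chkLoopA M xs
    if (PySem.List.pyGet? x 0).getD 0 - (PySem.List.pyGet? x 1).getD 0 ≤ M then
      ((x.set 1 0) :: r.1, r.2 + 1)
    else
      ((x.set 1 ((PySem.List.pyGet? x 1).getD 0 + M)) :: r.1, r.2)

def checkChoosing (elegidos : List (List Int)) (MaxTime : Int) : List (List Int) × List (List Int) :=
  let s := PySem.List.sorted elegidos (fun x => pvKey x) false
  let r := chkLoopA MaxTime s
  (PySem.List.slice r.1 none (some r.2), PySem.List.slice r.1 (some r.2) none)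

-- ===== PORT B =====
-- Source B's hand-written binary search: while lo < hi: mid = (lo+hi)//2; …
def bisLoop (e : List (List Int)) (M : Int) (lo hi : Int) : Int :=
  if h : lo < hi then
    let mid := PySem.Int.floordiv (lo + hi) 2
    let x := (PySem.List.pyGet? e mid).getD []
    if (PySem.List.pyGet? x 0).getD 0 - (PySem.List.pyGet? x 1).getD 0 ≤ M then
      bisLoop e M (mid + 1) hi
    else
      bisLoop e M lo mid
  else lo
termination_by (hi - lo).toNat
decreasing_by
  · have h1 := PySem.Int.le_floordiv_iff_mul_le (a := lo + hi) (b := 2) (q := lo) (by omega)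
    have h2 := PySem.Int.floordiv_lt_iff_lt_mul (a := lo + hi) (b := 2) (q := hi) (by omega)
    omega
  · have h2 := PySem.Int.floordiv_lt_iff_lt_mul (a := lo + hi) (b := 2) (q := hi) (by omega)
    omega

def checkChoosing_alt (elegidos : List (List Int)) (MaxTime : Int) : List (List Int) × List (List Int) :=
  let s := PySem.List.sorted elegidos (fun x => pvKey x) false
  let lo := bisLoop s MaxTime 0 (s.length : Int)
  let head := PySem.List.slice s none (some lo)
  let tail := PySem.List.slice s (some lo) none
  (head.map (fun x => x.set 1 0),
   tail.map (fun x => x.set 1 ((PySem.List.pyGet? x 1).getD 0 + MaxTime)))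

-- ===== PRECONDITION & SPEC =====
-- Pre_ excludes rows with fewer than two entries, on which Python A raises IndexError inside the sort key.
def Pre_checkChoosing (elegidos : List (List Int)) (MaxTime : Int) : Prop :=
  ∀ l ∈ elegidos, 2 ≤ l.length
instance (elegidos : List (List Int)) (MaxTime : Int) : Decidable (Pre_checkChoosing elegidos MaxTime) := by unfold Pre_checkChoosing; infer_instance

def pvWitness_checkChoosing : List (List Int) × Int := ([[3, 1], [5, 1], [9, 2]], 2)

def Spec_checkChoosing (elegidos : List (List Int)) (MaxTime : Int) (out : List (List Int) × List (List Int)) : Prop := out = checkChoosing_alt elegidos MaxTime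
instance (elegidos : List (List Int)) (MaxTime : Int) (out : List (List Int) × List (List Int)) : Decidable (Spec_checkChoosing elegidos MaxTime out) := by unfold Spec_checkChoosing; infer_instance

-- ===== CLAIM (what is proved, stated in full; the proofs are below) =====
def Claim_equal_checkChoosing : Prop := ∀ (elegidos : List (List Int)) (MaxTime : Int), Dom_checkChoosing elegidos MaxTime → Pre_checkChoosing elegidos MaxTime → Spec_checkChoosing elegidos MaxTime (checkChoosing elegidos MaxTime)

-- ===== LEMMAS AND PROOFS =====

-- row transform A applies
def pvF (M : Int) (x : List Int) : List Int :=
  if pvKey x ≤ M then x.set 1 0 else x.set 1 ((PySem.List.pyGet? x 1).getD 0 + M)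

def pvP (M : Int) (x : List Int) : Bool := decide (pvKey x ≤ M)

lemma chkLoopA_eq (M : Int) (l : List (List Int)) :
    chkLoopA M l = (l.map (pvF M), (l.countP (pvP M) : Int)) := by
  induction l with
  | nil => simp [chkLoopA]
  | cons x xs ih =>
    simp only [chkLoopA, ih, pvF, pvP, pvKey, List.map_cons, List.countP_cons]
    by_cases h : (PySem.List.pyGet? x 0).getD 0 - (PySem.List.pyGet? x 1).getD 0 ≤ M <;>
      simp [h]

lemma countP_char {α : Type} (p : α → Bool) :
    ∀ (s : List α) (k : Nat), k ≤ s.length →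
      (∀ i (h : i < s.length), p s[i] = decide (i < k)) → s.countP p = k := by
  intro s
  induction s with
  | nil =>
    intro k hk _
    have : k = 0 := by simpa using hk
    simp [this]
  | cons x xs ih =>
    intro k hk hchar
    have h0 : p x = decide (0 < k) := hchar 0 (by simp)
    cases k with
    | zero =>
      simp only [List.countP_cons]
      have : xs.countP p = 0 := ih 0 (by omega) (fun i h => by
        have := hchar (i + 1) (by simpa using Nat.succ_lt_succ h)
        simpa using this)
      simp [this, h0]
    | succ k' =>
      have : xs.countP p = k' := ih k' (by simpa using hk) (fun i h => by
        have := hchar (i + 1) (by simpa using Nat.succ_lt_succ h)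
        simp only [List.getElem_cons_succ] at this
        rw [this]; simp)
      simp only [List.countP_cons, this, h0]
      simp

-- on a list whose p-true rows form a prefix, every index is classified by countP
lemma prefix_closed_char {α : Type} (p : α → Bool) :
    ∀ (s : List α),
      (∀ i j (hi : i < s.length) (hj : j < s.length), i ≤ j → p s[j] = true → p s[i] = true) →
      ∀ i (h : i < s.length), p s[i] = decide (i < s.countP p) := by
  intro s
  induction s with
  | nil => intro _ i h; simp at h
  | cons x xs ih =>
    intro hpc i h
    have hpcx : ∀ j (hj : j < xs.length), p xs[j] = true → p x = true := by
      intro j hj hpj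
      exact hpc 0 (j + 1) (by simp) (by simpa using Nat.succ_lt_succ hj) (by omega)
        (by simpa using hpj)
    by_cases hx : p x = true
    · have hcnt : (x :: xs).countP p = xs.countP p + 1 := by simp [hx]
      cases i with
      | zero => simp [hx, hcnt]
      | succ i' =>
        have hxs := ih (fun a b ha hb hab hpb =>
          hpc (a + 1) (b + 1) (by simpa using Nat.succ_lt_succ ha)
            (by simpa using Nat.succ_lt_succ hb) (by omega) (by simpa using hpb))
        have h' : i' < xs.length := by simpa using Nat.lt_of_succ_lt_succ h
        have := hxs i' h'
        simp only [List.getElem_cons_succ, hcnt]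
        rw [this]; simp
    · have hxf : p x = false := by simpa using hx
      have hall : ∀ j (hj : j < xs.length), p xs[j] = false := by
        intro j hj
        by_contra hc
        exact hx (hpcx j hj (by simpa using hc))
      have hcxs : xs.countP p = 0 := by
        rw [List.countP_eq_zero]
        intro a ha
        obtain ⟨j, hj, rfl⟩ := List.getElem_of_mem ha
        exact by simpa using hall j hj
      have hcnt : (x :: xs).countP p = 0 := by simp [hxf, hcxs]
      cases i with
      | zero => simp [hxf, hcnt]
      | succ i' =>
        have h' : i' < xs.length := by simpa using Nat.lt_of_succ_lt_succ h
        simp [hcnt, hall i' h']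

lemma bisLoop_correct (s : List (List Int)) (M : Int)
    (hchar : ∀ i (h : i < s.length), pvP M s[i] = decide (i < s.countP (pvP M))) :
    ∀ (k : Nat) (lo hi : Int), (hi - lo).toNat ≤ k → 0 ≤ lo → lo ≤ hi → hi ≤ s.length →
      (∀ i (h : i < s.length), (i : Int) < lo → pvP M s[i] = true) →
      (∀ i (h : i < s.length), hi ≤ (i : Int) → pvP M s[i] = false) →
      bisLoop s M lo hi = (s.countP (pvP M) : Int) := by
  intro k
  induction k with
  | zero =>
    intro lo hi hk h0 hlh hhn hinv1 hinv2
    have hlh' : lo = hi := by omega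
    rw [bisLoop]
    simp only [hlh', lt_irrefl, dite_false]
    -- lo = hi : every index is classified, countP = hi.toNat
    have : s.countP (pvP M) = hi.toNat := by
      apply countP_char
      · omega
      · intro i h
        rw [hchar i h]
        by_cases hi2 : (i : Int) < lo
        · have := hinv1 i h hi2
          rw [hchar i h] at this
          simp at this ⊢; omega
        · have := hinv2 i h (by omega)
          rw [hchar i h] at this
          simp at this ⊢; omega
    rw [this]; omega
  | succ k' ih =>
    intro lo hi hk h0 hlh hhn hinv1 hinv2
    rw [bisLoop]
    by_cases h : lo < hi
    · simp only [h, dite_true]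
      set mid := PySem.Int.floordiv (lo + hi) 2 with hmid
      have hb1 := PySem.Int.le_floordiv_iff_mul_le (a := lo + hi) (b := 2) (q := lo) (by omega)
      have hb2 := PySem.Int.floordiv_lt_iff_lt_mul (a := lo + hi) (b := 2) (q := hi) (by omega)
      have hlo_mid : lo ≤ mid := by rw [hmid]; omega
      have hmid_hi : mid < hi := by rw [hmid]; omega
      have hmid0 : 0 ≤ mid := by omega
      have hmidn : mid.toNat < s.length := by omega
      have hget : PySem.List.pyGet? s mid = some s[mid.toNat] :=
        PySem.List.pyGet?_eq_some_getElem s hmid0 (by omega)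
      rw [hget]
      simp only [Option.getD_some]
      by_cases hc : (PySem.List.pyGet? s[mid.toNat] 0).getD 0 - (PySem.List.pyGet? s[mid.toNat] 1).getD 0 ≤ M
      · simp only [hc, if_true]
        apply ih (mid + 1) hi (by omega) (by omega) (by omega) hhn
        · intro i hilen hilt
          by_cases hlt : (i : Int) < lo
          · exact hinv1 i hilen hlt
          · -- lo ≤ i ≤ mid : p holds at mid, use the characterization
            have hpmid : pvP M s[mid.toNat] = true := by
              simp only [pvP, pvKey, decide_eq_true_eq]; exact hc
            rw [hchar mid.toNat hmidn] at hpmid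
            rw [hchar i hilen]
            simp at hpmid ⊢; omega
        · exact hinv2
      · simp only [hc, if_false]
        apply ih lo mid (by omega) (by omega) (by omega) (by omega) hinv1
        intro i hilen hge
        have hpmid : pvP M s[mid.toNat] = false := by
          simp only [pvP, pvKey, decide_eq_false_iff_not]; exact hc
        rw [hchar mid.toNat hmidn] at hpmid
        rw [hchar i hilen]
        simp at hpmid ⊢; omega
    · -- lo = hi, same as base case
      simp only [h, dite_false]
      have : s.countP (pvP M) = hi.toNat := by
        apply countP_char
        · omega
        · intro i hlen
          rw [hchar i hlen]
          by_cases hi2 : (i : Int) < lo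
          · have := hinv1 i hlen hi2
            rw [hchar i hlen] at this
            simp at this ⊢; omega
          · have := hinv2 i hlen (by omega)
            rw [hchar i hlen] at this
            simp at this ⊢; omega
      rw [this]; omega

-- ===== VERDICT (by name: the statement is the Claim_ definition above) =====
theorem checkChoosing_spec : Claim_equal_checkChoosing := by
  intro elegidos MaxTime _ _
  simp only [Spec_checkChoosing, checkChoosing, checkChoosing_alt]
  set s := PySem.List.sorted elegidos (fun x => pvKey x) false with hs
  set d := s.countP (pvP MaxTime) with hd
  have hdn : d ≤ s.length := List.countP_le_length
  have hmono : ∀ i j (hi : i < s.length) (hj : j < s.length), i ≤ j →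
      pvP MaxTime s[j] = true → pvP MaxTime s[i] = true := by
    intro i j hi hj hij hpj
    have := PySem.List.key_sorted_getElem_mono (xs := elegidos) (key := fun x => pvKey x)
      (p := i) (q := j) hij (by rwa [← hs])
    simp only [pvP, decide_eq_true_eq] at hpj ⊢
    calc pvKey s[i] ≤ pvKey s[j] := this
    _ ≤ MaxTime := hpj
  have hchar := prefix_closed_char (pvP MaxTime) s hmono
  rw [← hd] at hchar
  -- B's binary search lands on d
  have hbis : bisLoop s MaxTime 0 (s.length : Int) = (d : Int) := by
    apply bisLoop_correct s MaxTime hchar (s.length) 0 (s.length : Int)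
      (by omega) (by omega) (by omega) (by omega)
    · intro i _ hlt; omega
    · intro i h hge
      have : ¬ (i : Int) < (s.length : Int) := by omega
      exact absurd (by exact_mod_cast h) this
  -- A's loop is a conditional map plus the count d
  rw [chkLoopA_eq, hbis, ← hd]
  simp only [PySem.List.slice_to_natCast, PySem.List.slice_from_natCast]
  rw [← List.map_take, ← List.map_drop, Prod.mk.injEq]
  constructor
  · apply List.map_congr_left
    intro x hx
    obtain ⟨i, hi, rfl⟩ := List.getElem_of_mem hx
    rw [List.getElem_take] at *
    have hilen : i < s.length := by
      have := hi; simp [List.length_take] at this; omega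
    have hid : i < d := by
      have := hi; simp [List.length_take] at this; omega
    have hp : pvP MaxTime s[i] = true := by
      rw [hchar i hilen]; simpa using hid
    simp only [pvP, decide_eq_true_eq] at hp
    simp [pvF, hp]
  · apply List.map_congr_left
    intro x hx
    obtain ⟨i, hi, rfl⟩ := List.getElem_of_mem hx
    rw [List.getElem_drop] at *
    have hilen : d + i < s.length := by
      have := hi; simp [List.length_drop] at this; omega
    have hp : pvP MaxTime s[d + i] = false := by
      rw [hchar (d + i) hilen]; simp
    simp only [pvP, decide_eq_false_iff_not, not_le] at hp
    simp [pvF, not_le.mpr hp]
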